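-- pv_equiv track=rewrite | github.com/nikitaamlani/kg_nikitaamlani_2021 | main.py | checkOneToOneMapping
-- ===== SOURCE A (Python) =====
-- def checkOneToOneMapping(s1,s2):
--     #If the length of first string is not equal to the second string return false
--     if len(s1) != len(s2):
--         return False
--     mapDict ={}
--     for i in range(0,len(s1)):
--         #checking if the character exists in the dictionary
--         if s1[i] not in mapDict:
--             mapDict[s1[i]] = s2[i]
--         else:
--             if mapDict[s1[i]] != s2[i]:
--
--                 return False
--     return True
-- ===== SOURCE B (Python) =====
-- def checkOneToOneMapping(s1, s2):
--     # closed-form: the mapping is consistent iff the number of distinct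
--     # (s1-char, s2-char) pairs equals the number of distinct s1-chars
--     if len(s1) != len(s2):
--         return False
--     return len(set(zip(s1, s2))) == len(set(s1))
-- ===== Notes on version B (the rewrite author's own statement) =====
-- stated objective: idiomatic
-- what changed: Replaced the incremental dict-with-early-exit loop by a closed-form set-cardinality check: the mapping is consistent iff the number of distinct (s1,s2) character pairs equals the number of distinct s1 characters.
import Mathlib
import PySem

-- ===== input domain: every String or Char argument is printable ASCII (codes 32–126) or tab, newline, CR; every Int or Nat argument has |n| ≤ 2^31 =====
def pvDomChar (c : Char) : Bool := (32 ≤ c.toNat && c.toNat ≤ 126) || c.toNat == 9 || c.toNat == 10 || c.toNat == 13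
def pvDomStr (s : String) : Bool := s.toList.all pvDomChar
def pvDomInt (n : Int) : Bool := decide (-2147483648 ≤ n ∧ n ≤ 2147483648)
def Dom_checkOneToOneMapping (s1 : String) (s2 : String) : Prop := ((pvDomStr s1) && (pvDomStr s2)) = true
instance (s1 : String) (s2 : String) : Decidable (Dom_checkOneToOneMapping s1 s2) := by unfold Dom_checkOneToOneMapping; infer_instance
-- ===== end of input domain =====

-- B replaces A's incremental dict-with-early-exit loop by a closed-form set-cardinality
-- check (|set(zip(s1,s2))| = |set(s1)|); same result, different algorithm.

-- ===== PORT A =====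
-- the 'for i in range(0,len(s1))' loop indexing s1[i]/s2[i] in lockstep, as structural
-- recursion on the two character lists; dict state and branch order as in A
def loopA : List Char → List Char → PySem.Dict Char Char → Bool
  | c1 :: t1, c2 :: t2, d =>
    match d.get? c1 with
    | none => loopA t1 t2 (d.insert c1 c2)
    | some v => if v ≠ c2 then false else loopA t1 t2 d
  | _, _, _ => true

def checkOneToOneMapping (s1 : String) (s2 : String) : Bool :=
  if s1.toList.length ≠ s2.toList.length then false
  else loopA s1.toList s2.toList PySem.Dict.empty

-- ===== PORT B =====
def checkOneToOneMapping_alt (s1 : String) (s2 : String) : Bool :=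
  if s1.toList.length ≠ s2.toList.length then false
  else decide ((PySem.Set.ofList (s1.toList.zip s2.toList)).length
                = (PySem.Set.ofList s1.toList).length)

-- ===== PRECONDITION & SPEC =====
def Spec_checkOneToOneMapping (s1 : String) (s2 : String) (out : Bool) : Prop := out = checkOneToOneMapping_alt s1 s2
instance (s1 : String) (s2 : String) (out : Bool) : Decidable (Spec_checkOneToOneMapping s1 s2 out) := by unfold Spec_checkOneToOneMapping; infer_instance

-- ===== CLAIM (what is proved, stated in full; the proofs are below) =====
def Claim_equal_checkOneToOneMapping : Prop := ∀ (s1 : String) (s2 : String), Dom_checkOneToOneMapping s1 s2 → Spec_checkOneToOneMapping s1 s2 (checkOneToOneMapping s1 s2)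

-- ===== LEMMAS AND PROOFS =====

-- a list of pairs is a consistent mapping: equal firsts force equal seconds
def Cons (ps : List (Char × Char)) : Prop :=
  ∀ p ∈ ps, ∀ q ∈ ps, p.1 = q.1 → p.2 = q.2

theorem cons_iff_of_mem_iff {L1 L2 : List (Char × Char)}
    (h : ∀ x, x ∈ L1 ↔ x ∈ L2) : Cons L1 ↔ Cons L2 := by
  constructor <;> intro hc p hp q hq he
  · exact hc p ((h p).2 hp) q ((h q).2 hq) he
  · exact hc p ((h p).1 hp) q ((h q).1 hq) he

theorem cons_items (d : PySem.Dict Char Char) (hnd : d.keys.Nodup) : Cons d.items := by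
  rintro ⟨pk, pv⟩ hp ⟨qk, qv⟩ hq he
  simp only at he
  subst he
  have h1 := PySem.Dict.get?_of_mem_items d hp hnd
  have h2 := PySem.Dict.get?_of_mem_items d hq hnd
  rw [h1] at h2
  exact Option.some_inj.mp h2

-- A's loop returns true iff the dict's items together with the remaining pairs are consistent
theorem loopA_iff : ∀ (l1 l2 : List Char) (d : PySem.Dict Char Char),
    d.keys.Nodup → (loopA l1 l2 d = true ↔ Cons (d.items ++ l1.zip l2)) := by
  intro l1
  induction l1 with
  | nil =>
    intro l2 d hnd
    simp only [loopA, List.zip_nil_left, List.append_nil]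
    exact iff_of_true trivial (cons_items d hnd)
  | cons a t1 ih =>
    intro l2 d hnd
    cases l2 with
    | nil =>
      simp only [loopA, List.zip_nil_right, List.append_nil]
      exact iff_of_true trivial (cons_items d hnd)
    | cons b t2 =>
      simp only [loopA, List.zip_cons_cons]
      cases hg : d.get? a with
      | none =>
        have hcon : d.contains a = false := by
          rw [PySem.Dict.contains_eq_isSome_get?, hg]; rfl
        rw [ih t2 (d.insert a b) (PySem.Dict.nodup_keys_insert d a b hnd)]
        apply cons_iff_of_mem_iff
        intro x
        rw [PySem.Dict.items_insert_of_not_contains d b hcon]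
        simp only [List.mem_append, List.mem_cons]
        tauto
      | some v =>
        have hred : (match some v with
            | none => loopA t1 t2 (d.insert a b)
            | some w => if w ≠ b then false else loopA t1 t2 d)
            = (if v ≠ b then false else loopA t1 t2 d) := rfl
        rw [hred]
        by_cases hv : v = b
        · subst hv
          rw [if_neg (by simp : ¬ v ≠ v)]
          rw [ih t2 d hnd]
          apply cons_iff_of_mem_iff
          intro x
          have hmem : (a, v) ∈ d.items := PySem.Dict.mem_items_of_get?_eq_some _ hg
          simp only [List.mem_append, List.mem_cons]
          constructor
          · rintro (h | h)
            · exact Or.inl h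
            · exact Or.inr (Or.inr h)
          · rintro (h | h | h)
            · exact Or.inl h
            · subst h; exact Or.inl hmem
            · exact Or.inr h
        · rw [if_pos hv]
          constructor
          · intro hfalse; exact absurd hfalse (by simp)
          · intro hc
            exfalso
            have hmem : (a, v) ∈ d.items := PySem.Dict.mem_items_of_get?_eq_some _ hg
            exact hv (hc (a, v) (by simp [hmem]) (a, b) (by simp) rfl)

-- |set(l)| as a Finset cardinality
theorem len_ofList_eq_card {α : Type} [BEq α] [LawfulBEq α] [DecidableEq α] (l : List α) :
    (PySem.Set.ofList l).length = l.toFinset.card := by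
  have hfin : (PySem.Set.ofList l).toFinset = l.toFinset := by
    ext x; simp [PySem.Set.mem_ofList]
  rw [← hfin, List.toFinset_card_of_nodup (PySem.Set.nodup_ofList l)]

-- B's cardinality test holds iff the pair list is consistent
theorem card_iff_cons (ps : List (Char × Char)) :
    ((PySem.Set.ofList ps).length = (PySem.Set.ofList (ps.map Prod.fst)).length) ↔ Cons ps := by
  rw [len_ofList_eq_card, len_ofList_eq_card]
  have hm : (ps.map Prod.fst).toFinset = ps.toFinset.image Prod.fst := by ext x; simp
  rw [hm, eq_comm, Finset.card_image_iff]
  constructor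
  · intro hinj p hp q hq he
    have := hinj (by simpa using hp) (by simpa using hq) he
    rw [this]
  · intro hc x hx y hy he
    have hx' : x ∈ ps := by simpa using hx
    have hy' : y ∈ ps := by simpa using hy
    exact Prod.ext he (hc x hx' y hy' he)

-- ===== VERDICT (by name: the statement is the Claim_ definition above) =====
theorem checkOneToOneMapping_spec : Claim_equal_checkOneToOneMapping := by
  intro s1 s2 _
  unfold Spec_checkOneToOneMapping checkOneToOneMapping checkOneToOneMapping_alt
  by_cases h : s1.toList.length ≠ s2.toList.length
  · rw [if_pos h, if_pos h]
  · rw [if_neg h, if_neg h]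
    have hle : s1.toList.length ≤ s2.toList.length := le_of_eq (not_ne_iff.mp h)
    have hmap : (s1.toList.zip s2.toList).map Prod.fst = s1.toList :=
      List.map_fst_zip hle
    have hA := loopA_iff s1.toList s2.toList PySem.Dict.empty PySem.Dict.nodup_keys_empty
    have hempty : (PySem.Dict.empty : PySem.Dict Char Char).items = [] := rfl
    rw [hempty, List.nil_append] at hA
    rw [Bool.eq_iff_iff, decide_eq_true_iff, hA, ← card_iff_cons (s1.toList.zip s2.toList), hmap]
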